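-- pv_equiv track=rewrite | github.com/Technivian/CMS-Aegis | contracts/saml.py | _attribute_tokens
-- ===== SOURCE A (Python) =====
-- def _flatten_attribute_values(values) -> list[str]:
--     flattened = []
--     if isinstance(values, dict):
--         candidate = values.get('value')
--         if candidate not in {None, ''}:
--             flattened.append(str(candidate))
--         return flattened
--     if not isinstance(values, (list, tuple, set)):
--         if values not in {None, ''}:
--             flattened.append(str(values))
--         return flattened
--     for value in values:
--         flattened.extend(_flatten_attribute_values(value))
--     return flattened
--
-- def _attribute_tokens(attributes: dict[str, list[str]], keys: set[str]) -> set[str]: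
--     tokens: set[str] = set()
--     for key, values in attributes.items():
--         if key.lower() not in keys:
--             continue
--         for value in _flatten_attribute_values(values):
--             for token in str(value).replace(',', ' ').replace(';', ' ').split():
--                 normalized = token.strip().lower()
--                 if normalized:
--                     tokens.add(normalized)
--     return tokens
-- ===== SOURCE B (Python) =====
-- def _attribute_tokens(attributes, keys):
--     # Single char-level scan per value: no intermediate replaced/split strings.
--     tokens = set()
--     for key, values in attributes.items():
--         if key.lower() not in keys:
--             continue
--         for value in values:
--             current = []
--             for ch in str(value):
--                 if ch.isspace() or ch in ',;':
--                     if current: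
--                         tokens.add(''.join(current))
--                         current = []
--                 else:
--                     current.append(ch.lower())
--             if current:
--                 tokens.add(''.join(current))
--     return tokens
-- ===== Notes on version B (the rewrite author's own statement) =====
-- stated objective: alternative
-- what changed: A pipes each value through replace(',')/replace(';')/split()/strip()/lower() building intermediate strings; B is a single character-level scan per value that splits on whitespace/','/';' and lower-cases while accumulating the current token.
import Mathlib
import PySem

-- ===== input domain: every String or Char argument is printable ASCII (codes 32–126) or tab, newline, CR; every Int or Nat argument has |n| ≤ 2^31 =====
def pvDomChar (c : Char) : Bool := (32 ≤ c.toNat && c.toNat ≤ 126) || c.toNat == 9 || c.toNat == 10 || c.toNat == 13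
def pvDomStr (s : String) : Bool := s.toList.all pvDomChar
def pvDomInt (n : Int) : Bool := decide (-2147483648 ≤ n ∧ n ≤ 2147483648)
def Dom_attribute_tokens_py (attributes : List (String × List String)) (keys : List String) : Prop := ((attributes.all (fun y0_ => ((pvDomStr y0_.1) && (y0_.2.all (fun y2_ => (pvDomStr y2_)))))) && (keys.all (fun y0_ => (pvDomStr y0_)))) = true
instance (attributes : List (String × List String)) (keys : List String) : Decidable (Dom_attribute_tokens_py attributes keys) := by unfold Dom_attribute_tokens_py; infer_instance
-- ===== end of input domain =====

-- B replaces A's replace/split/strip/lower string pipeline by a single character-level scan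
-- per value (objective: alternative decomposition; same asymptotic cost, fewer intermediate strings).

-- ===== PORT A =====
-- _flatten_attribute_values: under the type convention `values` is a list of str, so the
-- recursive call always lands in the scalar branch (None is not representable; '' is filtered).
def flatten_scalar_py (v : String) : List String :=
  if v == "" then [] else [v]

def flatten_attribute_values_py (values : List String) : List String :=
  values.foldl (fun fl v => fl ++ flatten_scalar_py v) []

def attribute_tokens_py (attributes : List (String × List String)) (keys : List String) : List String :=
  attributes.foldl (fun tokens kv =>
    if !(PySem.Set.contains keys (PySem.Str.lower kv.1)) then tokens   -- continue
    else
      (flatten_attribute_values_py kv.2).foldl (fun tokens value =>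
        (PySem.Str.split₀ (PySem.Str.replace (PySem.Str.replace value "," " ") ";" " ")).foldl
          (fun tokens token =>
            let normalized := PySem.Str.lower (PySem.Str.strip token)
            if normalized != "" then PySem.Set.add tokens normalized else tokens)
          tokens)
        tokens)
    []

-- ===== PORT B =====
-- `current` holds single lower-cased characters, so Python's ''.join(current) is String.ofList.
def attribute_tokens_py_alt (attributes : List (String × List String)) (keys : List String) : List String :=
  attributes.foldl (fun tokens kv =>
    if PySem.Set.contains keys (PySem.Str.lower kv.1) then
      kv.2.foldl (fun tokens value =>
        let st := value.toList.foldl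
          (fun (p : PySem.Set String × List Char) ch =>
            if PySem.Chars.isspace ch || ch == ',' || ch == ';' then
              (if p.2 != [] then (PySem.Set.add p.1 (String.ofList p.2), ([] : List Char)) else p)
            else (p.1, p.2 ++ [PySem.Chars.lowerChar ch]))
          (tokens, ([] : List Char))
        if st.2 != [] then PySem.Set.add st.1 (String.ofList st.2) else st.1)
        tokens
    else tokens)
    []

-- ===== PRECONDITION & SPEC =====
def Spec_attribute_tokens_py (attributes : List (String × List String)) (keys : List String) (out : List String) : Prop := out = attribute_tokens_py_alt attributes keys
instance (attributes : List (String × List String)) (keys : List String) (out : List String) : Decidable (Spec_attribute_tokens_py attributes keys out) := by unfold Spec_attribute_tokens_py; infer_instance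

-- ===== CLAIM (what is proved, stated in full; the proofs are below) =====
def Claim_equal_attribute_tokens_py : Prop := ∀ (attributes : List (String × List String)) (keys : List String), Dom_attribute_tokens_py attributes keys → Spec_attribute_tokens_py attributes keys (attribute_tokens_py attributes keys)

-- ===== LEMMAS AND PROOFS =====

def pvRuns (p : Char → Bool) : List Char → List (List Char)
  | [] => []
  | c :: t =>
    if p c then pvRuns p t
    else (c :: t.takeWhile (fun x => !p x)) :: pvRuns p (t.dropWhile (fun x => !p x))
termination_by l => l.length
decreasing_by
  · simp
  · have := List.length_dropWhile_le (fun x => !p x) t; simp; omega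

def pvGlue (p : Char → Bool) (pre s : List Char) : List (List Char) :=
  if pre = [] then pvRuns p s
  else (pre ++ s.takeWhile (fun x => !p x)) :: pvRuns p (s.dropWhile (fun x => !p x))

lemma pvRuns_cons_pos (p : Char → Bool) {c : Char} (hc : p c = true) (t : List Char) :
    pvRuns p (c :: t) = pvRuns p t := by
  rw [pvRuns]; simp [hc]

lemma pvRuns_cons_neg (p : Char → Bool) {c : Char} (hc : p c = false) (t : List Char) :
    pvRuns p (c :: t) = (c :: t.takeWhile (fun x => !p x)) :: pvRuns p (t.dropWhile (fun x => !p x)) := by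
  rw [pvRuns]; simp [hc]

lemma pvGlue_step (p : Char → Bool) (pre : List Char) {c : Char} (hc : p c = false) (rest : List Char) :
    pvGlue p pre (c :: rest) = pvGlue p (pre ++ [c]) rest := by
  unfold pvGlue
  by_cases h : pre = []
  · simp [h, pvRuns_cons_neg p hc, List.takeWhile_cons, List.dropWhile_cons, hc]
  · simp [h, List.takeWhile_cons, List.dropWhile_cons, hc]

lemma pvGlue_sep (p : Char → Bool) (pre : List Char) {c : Char} (hc : p c = true) (rest : List Char) :
    pvGlue p pre (c :: rest) = (if pre = [] then [] else [pre]) ++ pvRuns p rest := by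
  unfold pvGlue
  by_cases h : pre = []
  · simp [h, pvRuns_cons_pos p hc]
  · simp [h, List.takeWhile_cons, List.dropWhile_cons, hc, pvRuns_cons_pos p hc]

lemma split₀_go_eq (s : List Char) : ∀ (cur : List Char) (acc : List (List Char)),
    PySem.Chars.split₀.go s cur acc = acc.reverse ++ pvGlue PySem.Chars.isspace cur.reverse s := by
  induction s with
  | nil =>
    intro cur acc
    rw [PySem.Chars.split₀.go]
    by_cases h : cur = []
    · simp [h, pvGlue, pvRuns]
    · simp [h, pvGlue, pvRuns]
  | cons c rest ih =>
    intro cur acc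
    rw [PySem.Chars.split₀.go]
    by_cases hc : PySem.Chars.isspace c
    · rw [pvGlue_sep _ _ hc]
      by_cases h : cur = []
      · simp [hc, h, ih, pvGlue]
      · simp [hc, h, ih, pvGlue]
    · rw [pvGlue_step _ _ (by simpa using hc)]
      have := ih (c :: cur) acc
      simp [hc, this]

lemma split₀_eq_runs (s : List Char) :
    PySem.Chars.split₀ s = pvRuns PySem.Chars.isspace s := by
  rw [PySem.Chars.split₀, split₀_go_eq]
  simp [pvGlue]

def pvSubst (c : Char) (ch : Char) : Char := if ch = c then ' ' else ch

lemma replace_go_single (c : Char) (fuel : Nat) : ∀ (l acc : List Char), l.length ≤ fuel →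
    PySem.Chars.replace.go [c] [' '] fuel l acc = acc.reverse ++ l.map (pvSubst c) := by
  induction fuel with
  | zero =>
    intro l acc h
    have : l = [] := by cases l <;> simp_all
    subst this; rw [PySem.Chars.replace.go]; simp
  | succ n ih =>
    intro l acc h
    cases l with
    | nil => rw [PySem.Chars.replace.go]; simp; omega
    | cons ch t =>
      rw [PySem.Chars.replace.go]
      by_cases hc : ch = c
      · have hp : [c].isPrefixOf (ch :: t) = true := by simp [List.isPrefixOf, hc]
        have hd : List.drop [c].length (ch :: t) = t := by simp
        simp only [hp, if_pos, hd]
        rw [ih t _ (by simpa using h)]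
        simp [pvSubst, hc]
      · have hp : [c].isPrefixOf (ch :: t) = false := by
          simp [List.isPrefixOf]; exact fun h' => absurd h'.symm hc
        simp only [hp]
        rw [ih t _ (by simpa using h)]
        simp [pvSubst, hc]

lemma replace_single (c : Char) (s : List Char) :
    PySem.Chars.replace s [c] [' '] = s.map (pvSubst c) := by
  rw [PySem.Chars.replace]
  simp [replace_go_single c s.length s [] le_rfl]

lemma runs_forall (p : Char → Bool) (l : List Char) :
    ∀ r ∈ pvRuns p l, r ≠ [] ∧ ∀ c ∈ r, p c = false := by
  induction l using pvRuns.induct p with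
  | case1 => simp [pvRuns]
  | case2 c t hc ih =>
    rw [pvRuns_cons_pos p hc]; exact ih
  | case3 c t hc ih =>
    rw [pvRuns_cons_neg p (by simpa using hc)]
    intro r hr
    rcases List.mem_cons.mp hr with h | h
    · subst h
      refine ⟨by simp, ?_⟩
      intro x hx
      rcases List.mem_cons.mp hx with h | h
      · subst h; simpa using hc
      · have := List.mem_takeWhile_imp h; simpa using this
    · exact ih r h

lemma runs_map (p q : Char → Bool) (f : Char → Char) (hf : ∀ c, q (f c) = p c) (l : List Char) :
    pvRuns q (l.map f) = (pvRuns p l).map (List.map f) := by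
  induction l using pvRuns.induct p with
  | case1 => simp [pvRuns]
  | case2 c t hc ih =>
    simp only [List.map_cons]
    rw [pvRuns_cons_pos q (by rw [hf]; exact hc), pvRuns_cons_pos p hc, ih]
  | case3 c t hc ih =>
    simp only [List.map_cons]
    rw [pvRuns_cons_neg q (by rw [hf]; simpa using hc), pvRuns_cons_neg p (by simpa using hc)]
    rw [List.takeWhile_map, List.dropWhile_map]
    have h1 : ((fun x => !q x) ∘ f) = (fun x => !p x) := by funext x; simp [hf]
    rw [h1, ih]
    simp

lemma dropWhile_no_space (l : List Char) (h : ∀ c ∈ l, PySem.Chars.isspace c = false) :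
    l.dropWhile PySem.Chars.isspace = l := by
  cases l with
  | nil => simp
  | cons a t => simp [List.dropWhile_cons, h a (by simp)]

lemma strip_of_no_space (r : List Char) (h : ∀ c ∈ r, PySem.Chars.isspace c = false) :
    PySem.Chars.strip r = r := by
  rw [PySem.Chars.strip, PySem.Chars.lstrip, PySem.Chars.rstrip]
  rw [dropWhile_no_space r h, dropWhile_no_space r.reverse (by intro c hc; exact h c (by simpa using hc)), List.reverse_reverse]

def pvSep (c : Char) : Bool := PySem.Chars.isspace c || c == ',' || c == ';'

lemma sep_subst (c : Char) :
    PySem.Chars.isspace (pvSubst ';' (pvSubst ',' c)) = pvSep c := by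
  unfold pvSubst pvSep
  by_cases h1 : c = ','
  · subst h1; decide
  · by_cases h2 : c = ';'
    · subst h2; decide
    · simp only [pvSubst, if_neg h1, if_neg h2]
      rw [show (c == ',') = false by simpa using h1, show (c == ';') = false by simpa using h2]
      simp

lemma subst_fix {c : Char} (h : pvSep c = false) : pvSubst ';' (pvSubst ',' c) = c := by
  have h1 : c ≠ ',' := by rintro rfl; simp [pvSep] at h
  have h2 : c ≠ ';' := by rintro rfl; simp [pvSep] at h
  simp [pvSubst, h1, h2]

lemma sep_no_space {c : Char} (h : pvSep c = false) : PySem.Chars.isspace c = false := by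
  simp [pvSep] at h; exact h.1.1

lemma A_value (s : PySem.Set String) (v : String) :
    (PySem.Str.split₀ (PySem.Str.replace (PySem.Str.replace v "," " ") ";" " ")).foldl
      (fun tokens token =>
        let normalized := PySem.Str.lower (PySem.Str.strip token)
        if normalized != "" then PySem.Set.add tokens normalized else tokens) s
    = ((pvRuns pvSep v.toList).map (fun r => String.ofList (r.map PySem.Chars.lowerChar))).foldl
        PySem.Set.add s := by
  have hts : (PySem.Str.replace (PySem.Str.replace v "," " ") ";" " ").toList
      = v.toList.map (fun c => pvSubst ';' (pvSubst ',' c)) := by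
    simp [PySem.Str.replace, String.toList_ofList]
    rw [replace_single, replace_single, List.map_map]
    rfl
  have hruns : PySem.Chars.split₀ ((PySem.Str.replace (PySem.Str.replace v "," " ") ";" " ").toList)
      = (pvRuns pvSep v.toList).map (List.map (fun c => pvSubst ';' (pvSubst ',' c))) := by
    rw [hts, split₀_eq_runs, runs_map pvSep _ _ sep_subst]
  have hfix : ∀ r ∈ pvRuns pvSep v.toList,
      r.map (fun c => pvSubst ';' (pvSubst ',' c)) = r := by
    intro r hr
    conv_rhs => rw [← List.map_id r]
    apply List.map_congr_left
    intro c hc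
    exact subst_fix ((runs_forall pvSep v.toList r hr).2 c hc)
  rw [PySem.Str.split₀, hruns, List.map_map, List.foldl_map]
  conv_rhs => rw [List.foldl_map]
  apply PySem.List.foldl_congr_mem
  intro acc r hr
  obtain ⟨hne, hno⟩ := runs_forall pvSep v.toList r hr
  have hmap := hfix r hr
  simp only [Function.comp_apply, hmap]
  have hstrip : PySem.Str.strip (String.ofList r) = String.ofList r := by
    simp [PySem.Str.strip, String.toList_ofList]
    rw [strip_of_no_space r (fun c hc => sep_no_space (hno c hc))]
  rw [hstrip]
  have hlow : PySem.Str.lower (String.ofList r) = String.ofList (r.map PySem.Chars.lowerChar) := by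
    simp [PySem.Str.lower, String.toList_ofList, PySem.Chars.lower]
  rw [hlow]
  have hne' : String.ofList (r.map PySem.Chars.lowerChar) ≠ "" := by
    simp [String.ofList_eq_empty_iff]; exact hne
  simp [hne']

def pvGlueLow (cur l : List Char) : List (List Char) :=
  if cur = [] then (pvRuns pvSep l).map (List.map PySem.Chars.lowerChar)
  else (cur ++ (l.takeWhile (fun x => !pvSep x)).map PySem.Chars.lowerChar)
    :: (pvRuns pvSep (l.dropWhile (fun x => !pvSep x))).map (List.map PySem.Chars.lowerChar)

lemma pvGlueLow_sep (cur : List Char) {c : Char} (hc : pvSep c = true) (rest : List Char) :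
    pvGlueLow cur (c :: rest) = (if cur = [] then [] else [cur]) ++ (pvRuns pvSep rest).map (List.map PySem.Chars.lowerChar) := by
  unfold pvGlueLow
  by_cases h : cur = []
  · simp [h, pvRuns_cons_pos pvSep hc]
  · simp [h, List.takeWhile_cons, List.dropWhile_cons, hc, pvRuns_cons_pos pvSep hc]

lemma pvGlueLow_step (cur : List Char) {c : Char} (hc : pvSep c = false) (rest : List Char) :
    pvGlueLow cur (c :: rest) = pvGlueLow (cur ++ [PySem.Chars.lowerChar c]) rest := by
  unfold pvGlueLow
  by_cases h : cur = []
  · simp [h, pvRuns_cons_neg pvSep hc, List.takeWhile_cons, List.dropWhile_cons, hc]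
  · simp [h, List.takeWhile_cons, List.dropWhile_cons, hc]

lemma B_scan (l : List Char) : ∀ (s : PySem.Set String) (cur : List Char),
    (let st := l.foldl
        (fun (p : PySem.Set String × List Char) ch =>
          if PySem.Chars.isspace ch || ch == ',' || ch == ';' then
            (if p.2 != [] then (PySem.Set.add p.1 (String.ofList p.2), ([] : List Char)) else p)
          else (p.1, p.2 ++ [PySem.Chars.lowerChar ch]))
        (s, cur)
     if st.2 != [] then PySem.Set.add st.1 (String.ofList st.2) else st.1)
    = ((pvGlueLow cur l).map String.ofList).foldl PySem.Set.add s := by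
  induction l with
  | nil =>
    intro s cur
    by_cases h : cur = []
    · simp [h, pvGlueLow, pvRuns]
    · simp [h, pvGlueLow, pvRuns]
  | cons c rest ih =>
    intro s cur
    show (let st := List.foldl _ (if PySem.Chars.isspace c || c == ',' || c == ';' then
            (if ((s, cur).2 != []) then (PySem.Set.add (s, cur).1 (String.ofList (s, cur).2), ([] : List Char)) else (s, cur))
          else ((s, cur).1, (s, cur).2 ++ [PySem.Chars.lowerChar c])) rest
          if st.2 != [] then PySem.Set.add st.1 (String.ofList st.2) else st.1) = _
    by_cases hc : (PySem.Chars.isspace c || c == ',' || c == ';') = true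
    · rw [if_pos hc, pvGlueLow_sep cur (show pvSep c = true from hc) rest]
      by_cases h : cur = []
      · rw [if_neg (by simp [h] : ¬((s, cur).2 != []) = true)]
        rw [ih s cur]
        simp [h, pvGlueLow]
      · rw [if_pos (by simp [h] : ((s, cur).2 != []) = true)]
        rw [ih (PySem.Set.add s (String.ofList cur)) []]
        simp [h, pvGlueLow]
    · rw [if_neg hc, pvGlueLow_step cur (show pvSep c = false from eq_false_of_ne_true hc) rest]
      exact ih s (cur ++ [PySem.Chars.lowerChar c])

lemma B_value (s : PySem.Set String) (v : String) :
    (let st := v.toList.foldl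
        (fun (p : PySem.Set String × List Char) ch =>
          if PySem.Chars.isspace ch || ch == ',' || ch == ';' then
            (if p.2 != [] then (PySem.Set.add p.1 (String.ofList p.2), ([] : List Char)) else p)
          else (p.1, p.2 ++ [PySem.Chars.lowerChar ch]))
        (s, ([] : List Char))
     if st.2 != [] then PySem.Set.add st.1 (String.ofList st.2) else st.1)
    = ((pvRuns pvSep v.toList).map (fun r => String.ofList (r.map PySem.Chars.lowerChar))).foldl
        PySem.Set.add s := by
  rw [B_scan]
  simp [pvGlueLow, List.map_map]
  rfl

def pvTok (s : PySem.Set String) (v : String) : PySem.Set String :=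
  ((pvRuns pvSep v.toList).map (fun r => String.ofList (r.map PySem.Chars.lowerChar))).foldl
    PySem.Set.add s

lemma flatten_aux (values : List String) : ∀ (fl : List String),
    values.foldl (fun fl v => fl ++ flatten_scalar_py v) fl
      = fl ++ values.filter (fun v => !(v == "")) := by
  induction values with
  | nil => intro fl; simp
  | cons v vs ih =>
    intro fl
    simp only [List.foldl_cons]
    rw [ih]
    by_cases h : v = ""
    · have hb : (v == "") = true := by simpa using h
      rw [List.filter_cons_of_neg (p := fun v => !(v == "")) (by simp [hb])]
      simp [flatten_scalar_py, hb]
    · have hb : (v == "") = false := by simpa using h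
      rw [List.filter_cons_of_pos (p := fun v => !(v == "")) (by simp [hb])]
      simp [flatten_scalar_py, hb]

lemma pvTok_empty (s : PySem.Set String) : pvTok s "" = s := by
  simp [pvTok, pvRuns]

lemma value_fold_eq (values : List String) : ∀ (s : PySem.Set String),
    (flatten_attribute_values_py values).foldl (fun tokens value =>
        (PySem.Str.split₀ (PySem.Str.replace (PySem.Str.replace value "," " ") ";" " ")).foldl
          (fun tokens token =>
            let normalized := PySem.Str.lower (PySem.Str.strip token)
            if normalized != "" then PySem.Set.add tokens normalized else tokens)
          tokens) s
      = values.foldl (fun tokens value =>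
          let st := value.toList.foldl
            (fun (p : PySem.Set String × List Char) ch =>
              if PySem.Chars.isspace ch || ch == ',' || ch == ';' then
                (if p.2 != [] then (PySem.Set.add p.1 (String.ofList p.2), ([] : List Char)) else p)
              else (p.1, p.2 ++ [PySem.Chars.lowerChar ch]))
            (tokens, ([] : List Char))
          if st.2 != [] then PySem.Set.add st.1 (String.ofList st.2) else st.1) s := by
  have hA : ∀ (s : PySem.Set String) (vs : List String),
      vs.foldl (fun tokens value =>
        (PySem.Str.split₀ (PySem.Str.replace (PySem.Str.replace value "," " ") ";" " ")).foldl
          (fun tokens token =>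
            let normalized := PySem.Str.lower (PySem.Str.strip token)
            if normalized != "" then PySem.Set.add tokens normalized else tokens)
          tokens) s = vs.foldl pvTok s := by
    intro s vs
    apply PySem.List.foldl_congr_mem
    intro acc v _
    exact A_value acc v
  have hB : ∀ (s : PySem.Set String) (vs : List String),
      vs.foldl (fun tokens value =>
          let st := value.toList.foldl
            (fun (p : PySem.Set String × List Char) ch =>
              if PySem.Chars.isspace ch || ch == ',' || ch == ';' then
                (if p.2 != [] then (PySem.Set.add p.1 (String.ofList p.2), ([] : List Char)) else p)
              else (p.1, p.2 ++ [PySem.Chars.lowerChar ch]))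
            (tokens, ([] : List Char))
          if st.2 != [] then PySem.Set.add st.1 (String.ofList st.2) else st.1) s
        = vs.foldl pvTok s := by
    intro s vs
    apply PySem.List.foldl_congr_mem
    intro acc v _
    exact B_value acc v
  intro s
  rw [hA, hB]
  rw [show flatten_attribute_values_py values
      = values.filter (fun v => !(v == "")) from flatten_aux values []]
  induction values generalizing s with
  | nil => simp
  | cons v vs ih =>
    by_cases h : v = ""
    · have hb : (v == "") = true := by simpa using h
      rw [List.filter_cons_of_neg (p := fun v => !(v == "")) (by simp [hb]), List.foldl_cons, h, pvTok_empty]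
      exact ih s
    · have hb : (v == "") = false := by simpa using h
      rw [List.filter_cons_of_pos (p := fun v => !(v == "")) (by simp [hb]), List.foldl_cons, List.foldl_cons]
      exact ih (pvTok s v)

theorem main_eq (attributes : List (String × List String)) (keys : List String) :
    attribute_tokens_py attributes keys = attribute_tokens_py_alt attributes keys := by
  unfold attribute_tokens_py attribute_tokens_py_alt
  apply PySem.List.foldl_congr_mem
  intro acc kv _
  by_cases h : PySem.Set.contains keys (PySem.Str.lower kv.1) = true
  · rw [if_neg (by simp [PySem.Set.contains] at h ⊢; simpa using h), if_pos h]
    exact value_fold_eq kv.2 acc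
  · rw [if_pos (by simp [PySem.Set.contains] at h ⊢; simpa using h), if_neg h]

-- ===== VERDICT (by name: the statement is the Claim_ definition above) =====
theorem attribute_tokens_py_spec : Claim_equal_attribute_tokens_py := by
  intro attributes keys _
  unfold Spec_attribute_tokens_py
  exact main_eq attributes keys
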